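-- pv_equiv track=rewrite | github.com/fyanardi/tealight-api-oanda-v20 | classgen/classgen.py | gen_enum
-- ===== SOURCE A (Python) =====
-- def gen_enum(name, package, values):
--     """
--     return: list of string of the generated enum
--     """
--     lines = []
--     lines.append("package {};".format(package))
--
--     lines.append("")
--     lines.append("public enum {} {{".format(name))
--
--     for i in range(len(values)):
--         if i != len(values) - 1:
--             lines.append("    {},".format(values[i][0]))
--         else:
--             lines.append("    {}".format(values[i][0]))
--
--     lines.append("}")
--
--     return lines
-- ===== SOURCE B (Python) =====
-- def gen_enum(name, package, values):
--     """
--     return: list of string of the generated enum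
--     """
--     def body(vs):
--         # recursion on the list structure: the comma is present exactly when a
--         # non-empty tail of further values remains
--         if not vs:
--             return []
--         if len(vs) == 1:
--             return ["    " + vs[0][0]]
--         return ["    " + vs[0][0] + ","] + body(vs[1:])
--
--     return ["package {};".format(package),
--             "",
--             "public enum {} {{".format(name)] + body(values) + ["}"]
-- ===== Notes on version B (the rewrite author's own statement) =====
-- stated objective: alternative
-- what changed: Replaces A's index loop (comma decided by comparing the loop index with len(values)-1 on each iteration) by structural recursion on the list: a helper recurses on the tail and emits the comma exactly when a non-empty tail remains, with headers/footer assembled by concatenation instead of repeated append.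
import Mathlib
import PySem

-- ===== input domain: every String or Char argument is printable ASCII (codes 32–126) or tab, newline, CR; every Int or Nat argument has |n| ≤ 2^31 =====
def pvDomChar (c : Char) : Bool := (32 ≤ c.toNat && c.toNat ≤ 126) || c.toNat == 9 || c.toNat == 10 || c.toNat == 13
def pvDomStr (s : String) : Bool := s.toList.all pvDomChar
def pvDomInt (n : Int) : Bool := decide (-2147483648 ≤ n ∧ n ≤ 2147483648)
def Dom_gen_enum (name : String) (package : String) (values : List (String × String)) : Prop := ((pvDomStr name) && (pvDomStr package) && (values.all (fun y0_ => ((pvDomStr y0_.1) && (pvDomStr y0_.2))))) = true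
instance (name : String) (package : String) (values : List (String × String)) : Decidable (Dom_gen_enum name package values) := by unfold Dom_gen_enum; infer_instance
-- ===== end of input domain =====

-- B replaces A's indexed loop (comma decided by comparing the loop index with len-1 each iteration)
-- by structural recursion on the list: the comma is emitted exactly when a non-empty tail remains.

-- ===== PORT A =====
-- literal transliteration of A; values[i] is always in range (i ∈ range(len(values))), so pyGetD's
-- default is never used
def gen_enum (name : String) (package : String) (values : List (String × String)) : List String :=
  let lines : List String := []
  let lines := lines ++ ["package " ++ package ++ ";"]
  let lines := lines ++ [""]
  let lines := lines ++ ["public enum " ++ name ++ " {"]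
  let lines := (PySem.List.pyRange 0 (values.length : Int) 1).foldl (fun lines i =>
    if i ≠ (values.length : Int) - 1 then
      lines ++ ["    " ++ (PySem.List.pyGetD values i ("", "")).1 ++ ","]
    else
      lines ++ ["    " ++ (PySem.List.pyGetD values i ("", "")).1]) lines
  lines ++ ["}"]

-- ===== PORT B =====
-- B's recursive helper: comma iff a non-empty tail of further values remains
def genEnumBody : List (String × String) → List String
  | [] => []
  | [v] => ["    " ++ v.1]
  | v :: rest => ("    " ++ v.1 ++ ",") :: genEnumBody rest

def gen_enum_alt (name : String) (package : String) (values : List (String × String)) : List String :=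
  ["package " ++ package ++ ";", "", "public enum " ++ name ++ " {"] ++ genEnumBody values ++ ["}"]

-- ===== PRECONDITION & SPEC =====
def Spec_gen_enum (name : String) (package : String) (values : List (String × String)) (out : List String) : Prop := out = gen_enum_alt name package values
instance (name : String) (package : String) (values : List (String × String)) (out : List String) : Decidable (Spec_gen_enum name package values out) := by unfold Spec_gen_enum; infer_instance

-- ===== CLAIM (what is proved, stated in full; the proofs are below) =====
def Claim_equal_gen_enum : Prop := ∀ (name : String) (package : String) (values : List (String × String)), Dom_gen_enum name package values → Spec_gen_enum name package values (gen_enum name package values)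

-- ===== LEMMAS AND PROOFS =====

-- a map over range(len l) reading l by index is a map over l
theorem map_f_getD_range {α β : Type} (l : List α) (d : α) (f : α → β) :
    (List.range l.length).map (fun k => f (l.getD k d)) = l.map f := by
  apply List.ext_getElem
  · simp
  · intro i h1 h2
    simp [List.getD]
    simp at h1
    simp [List.getElem?_eq_getElem h1]

-- A's loop over values = vs ++ [v]: every index below the last takes the comma branch,
-- the last index takes the plain branch
theorem bodyA_append (acc : List String) (vs : List (String × String)) (v : String × String) :
    (PySem.List.pyRange 0 ((vs ++ [v]).length : Int) 1).foldl (fun lines i =>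
      if i ≠ ((vs ++ [v]).length : Int) - 1 then
        lines ++ ["    " ++ (PySem.List.pyGetD (vs ++ [v]) i ("", "")).1 ++ ","]
      else
        lines ++ ["    " ++ (PySem.List.pyGetD (vs ++ [v]) i ("", "")).1]) acc
    = acc ++ vs.map (fun p => "    " ++ p.1 ++ ",") ++ ["    " ++ v.1] := by
  have hlen : (((vs ++ [v]).length : Nat) : Int) = (vs.length : Int) + 1 := by
    simp
  have hsplit : PySem.List.pyRange 0 ((vs ++ [v]).length : Int) 1
      = PySem.List.pyRange 0 (vs.length : Int) 1 ++ [(vs.length : Int)] := by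
    rw [hlen]
    exact PySem.List.pyRange_one_succ_right (by positivity)
  rw [hsplit, List.foldl_append]
  -- the final iteration: i = len(vs), the plain branch
  have hlast : ¬ ((vs.length : Int) ≠ ((vs ++ [v]).length : Int) - 1) := by simp
  rw [List.foldl_cons, List.foldl_nil, if_neg hlast]
  have hgetlast : PySem.List.pyGetD (vs ++ [v]) (vs.length : Int) ("", "") = v := by
    rw [PySem.List.pyGetD_natCast]
    simp [List.getD]
  rw [hgetlast]
  -- the prefix iterations: each i < len(vs) takes the comma branch
  congr 1
  have hcongr : (PySem.List.pyRange 0 (vs.length : Int) 1).foldl (fun lines i =>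
      if i ≠ ((vs ++ [v]).length : Int) - 1 then
        lines ++ ["    " ++ (PySem.List.pyGetD (vs ++ [v]) i ("", "")).1 ++ ","]
      else
        lines ++ ["    " ++ (PySem.List.pyGetD (vs ++ [v]) i ("", "")).1]) acc
    = (PySem.List.pyRange 0 (vs.length : Int) 1).foldl (fun lines i =>
        lines ++ ["    " ++ (PySem.List.pyGetD (vs ++ [v]) i ("", "")).1 ++ ","]) acc := by
    apply List.foldl_ext
    intro b i hi
    rw [PySem.List.mem_pyRange_one] at hi
    rw [if_pos]
    rw [hlen]
    omega
  rw [hcongr, PySem.List.foldl_append_singleton_eq_map]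
  congr 1
  rw [PySem.List.pyRange_one]
  simp only [Int.sub_zero, Int.toNat_natCast, List.map_map]
  calc (List.range vs.length).map ((fun i => "    " ++ (PySem.List.pyGetD (vs ++ [v]) i ("", "")).1 ++ ",") ∘ (fun k : Nat => (0:Int) + (k:Int)))
      = (List.range vs.length).map (fun k : Nat => "    " ++ ((vs ++ [v]).getD k ("", "")).1 ++ ",") := by
        apply List.map_congr_left
        intro k hk
        simp only [Function.comp]
        rw [Int.zero_add, PySem.List.pyGetD_natCast]
    _ = (List.range vs.length).map (fun k : Nat => "    " ++ (vs.getD k ("", "")).1 ++ ",") := by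
        apply List.map_congr_left
        intro k hk
        simp at hk
        congr 2
        rw [List.getD, List.getD, List.getElem?_append_left hk]
    _ = vs.map (fun p => "    " ++ p.1 ++ ",") := map_f_getD_range vs ("", "") (fun p => "    " ++ p.1 ++ ",")

-- B's recursion, characterised on a list split at its last element
theorem genEnumBody_append (vs : List (String × String)) (v : String × String) :
    genEnumBody (vs ++ [v]) = vs.map (fun p => "    " ++ p.1 ++ ",") ++ ["    " ++ v.1] := by
  induction vs with
  | nil => simp [genEnumBody]
  | cons p ps ih =>
    cases ps with
    | nil => simp [genEnumBody]
    | cons q qs =>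
      simp only [List.cons_append, List.map_cons]
      rw [show genEnumBody (p :: q :: (qs ++ [v]))
            = ("    " ++ p.1 ++ ",") :: genEnumBody (q :: (qs ++ [v])) from rfl]
      rw [List.cons_append] at ih
      rw [ih]
      simp

-- ===== VERDICT (by name: the statement is the Claim_ definition above) =====
theorem gen_enum_spec : Claim_equal_gen_enum := by
  intro name package values _
  unfold Spec_gen_enum gen_enum gen_enum_alt
  rcases values.eq_nil_or_concat with h | ⟨vs, v, h⟩
  · subst h; simp [PySem.List.pyRange_one_eq_nil, genEnumBody]
  · subst h
    simp only [List.concat_eq_append]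
    rw [bodyA_append, genEnumBody_append]
    simp
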